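-- pv_equiv track=rewrite | github.com/PravalikaThummanapelly/PythonCode_Practise | special_fibo.py | spcl_fibo
-- ===== SOURCE A (Python) =====
-- def spcl_fibo(n):
--     if n==0 or n==1:
--         return 1
--     f0,f1=1,1
--     for i in range(2,n+1):
--         fn=(f1*f1+f0*f0)%47
--         f0 , f1=f1,fn
--     return fn
-- ===== SOURCE B (Python) =====
-- def spcl_fibo(n):
--     if n == 0 or n == 1:
--         return 1
--     # The state orbit of (1,1) under (a,b) -> (b, (a*a+b*b) % 47) enters a
--     # 24-cycle after 32 steps, so the step count can be reduced mod 24: O(1).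
--     m = n - 1
--     if m > 32:
--         m = 32 + (m - 32) % 24
--     f0, f1 = 1, 1
--     for _ in range(m):
--         f0, f1 = f1, (f0 * f0 + f1 * f1) % 47
--     return f1
-- ===== Notes on version B (the rewrite author's own statement) =====
-- stated objective: faster
-- what changed: B exploits that the (f0,f1) state orbit mod 47 enters a 24-cycle after 32 steps, reducing the step count to at most 55 iterations instead of iterating the recurrence n-1 times.
import Mathlib
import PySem

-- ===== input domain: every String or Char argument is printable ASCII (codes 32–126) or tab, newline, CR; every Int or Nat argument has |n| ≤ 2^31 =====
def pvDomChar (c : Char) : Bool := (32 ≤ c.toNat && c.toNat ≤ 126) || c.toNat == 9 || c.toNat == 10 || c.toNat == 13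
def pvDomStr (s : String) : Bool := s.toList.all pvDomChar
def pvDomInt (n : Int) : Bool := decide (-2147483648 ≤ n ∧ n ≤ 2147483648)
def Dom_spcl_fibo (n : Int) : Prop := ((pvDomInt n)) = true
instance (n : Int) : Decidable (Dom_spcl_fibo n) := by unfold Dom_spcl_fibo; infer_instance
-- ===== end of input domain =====

-- B replaces A's n-1 recurrence iterations by at most 55 of them, using that the
-- state orbit of (1,1) mod 47 enters a 24-cycle after 32 steps (O(1) vs O(n)).

-- ===== PORT A =====
def spcl_fibo (n : Int) : Int :=
  if n == 0 || n == 1 then 1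
  else
    ((PySem.List.pyRange 2 (n + 1) 1).foldl
      (fun (st : Int × Int × Int) _ =>
        (st.2.1, PySem.Int.mod (st.2.1 * st.2.1 + st.1 * st.1) 47,
                 PySem.Int.mod (st.2.1 * st.2.1 + st.1 * st.1) 47))
      (1, 1, 0)).2.2

-- ===== PORT B =====
def pvStep (p : Int × Int) : Int × Int := (p.2, PySem.Int.mod (p.1 * p.1 + p.2 * p.2) 47)

def spcl_fibo_alt (n : Int) : Int :=
  if n == 0 || n == 1 then 1
  else
    let m0 := n - 1
    let m := if m0 > 32 then 32 + PySem.Int.mod (m0 - 32) 24 else m0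
    (pvStep^[m.toNat] (1, 1)).2

-- ===== PRECONDITION & SPEC =====
-- Pre_ excludes only n < 0, where A's loop never runs and 'return fn' raises NameError.
def Pre_spcl_fibo (n : Int) : Prop := 0 ≤ n
instance (n : Int) : Decidable (Pre_spcl_fibo n) := by unfold Pre_spcl_fibo; infer_instance
def pvWitness_spcl_fibo : Int := 5

def Spec_spcl_fibo (n : Int) (out : Int) : Prop := out = spcl_fibo_alt n
instance (n : Int) (out : Int) : Decidable (Spec_spcl_fibo n out) := by unfold Spec_spcl_fibo; infer_instance

-- ===== CLAIM (what is proved, stated in full; the proofs are below) =====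
def Claim_equal_spcl_fibo : Prop := ∀ (n : Int), Dom_spcl_fibo n → Pre_spcl_fibo n → Spec_spcl_fibo n (spcl_fibo n)
-- ===== LEMMAS AND PROOFS =====

-- a fold whose body ignores the list element is an iterate of the body
theorem pv_foldl_const {α β : Type} (g : α → α) :
    ∀ (l : List β) (init : α), l.foldl (fun st _ => g st) init = g^[l.length] init := by
  intro l
  induction l with
  | nil => intro init; simp
  | cons x xs ih =>
      intro init
      simp [List.foldl_cons, ih, Function.iterate_succ_apply]

-- A's triple-state step, named for the lemmas
def pvStepA (st : Int × Int × Int) : Int × Int × Int :=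
  (st.2.1, PySem.Int.mod (st.2.1 * st.2.1 + st.1 * st.1) 47,
           PySem.Int.mod (st.2.1 * st.2.1 + st.1 * st.1) 47)

theorem pv_triple_pair : ∀ (k : ℕ) (a b c : Int),
    pvStepA^[k + 1] (a, b, c) =
      ((pvStep^[k + 1] (a, b)).1, (pvStep^[k + 1] (a, b)).2, (pvStep^[k + 1] (a, b)).2) := by
  intro k
  induction k with
  | zero =>
      intro a b c
      have h : b * b + a * a = a * a + b * b := by ring
      simp [pvStepA, pvStep, h]
  | succ k ih =>
      intro a b c
      rw [Function.iterate_succ_apply' pvStepA (k + 1), ih,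
          Function.iterate_succ_apply' pvStep (k + 1)]
      have h : (pvStep^[k + 1] (a, b)).2 * (pvStep^[k + 1] (a, b)).2 +
               (pvStep^[k + 1] (a, b)).1 * (pvStep^[k + 1] (a, b)).1 =
               (pvStep^[k + 1] (a, b)).1 * (pvStep^[k + 1] (a, b)).1 +
               (pvStep^[k + 1] (a, b)).2 * (pvStep^[k + 1] (a, b)).2 := by ring
      simp [pvStepA, pvStep]
      ring_nf

-- A for n ≥ 2 is the pair iterate
theorem pv_A_iterate (n : Int) (h2 : 2 ≤ n) :
    spcl_fibo n = (pvStep^[(n - 1).toNat] (1, 1)).2 := by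
  have hne0 : ¬ (n == 0 || n == 1) = true := by
    simp only [beq_iff_eq, Bool.or_eq_true]
    omega
  have hlen : (PySem.List.pyRange 2 (n + 1) 1).length = (n - 1).toNat := by
    rw [PySem.List.length_pyRange_one]; omega
  obtain ⟨k, hk⟩ : ∃ k : ℕ, (n - 1).toNat = k + 1 := ⟨(n - 1).toNat - 1, by omega⟩
  unfold spcl_fibo
  rw [if_neg hne0]
  have hfold := pv_foldl_const pvStepA (PySem.List.pyRange 2 (n + 1) 1) ((1 : Int), (1 : Int), (0 : Int))
  show ((PySem.List.pyRange 2 (n + 1) 1).foldl (fun st _ => pvStepA st) (1, 1, 0)).2.2 = _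
  rw [hfold, hlen, hk, pv_triple_pair]

-- the orbit of (1,1) is periodic with period 24 from step 32 on
theorem pv_cycle : pvStep^[24] (pvStep^[32] (1, 1)) = pvStep^[32] (1, 1) := by decide

theorem pv_tail : ∀ (t : ℕ), pvStep^[t] (pvStep^[32] (1, 1)) = pvStep^[t % 24] (pvStep^[32] (1, 1)) := by
  intro t
  induction t using Nat.strong_induction_on with
  | _ t ih =>
    by_cases h : t < 24
    · rw [Nat.mod_eq_of_lt h]
    · have ht : t = (t - 24) + 24 := by omega
      rw [ht, Function.iterate_add_apply, pv_cycle, ih (t - 24) (by omega)]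
      congr 1
      omega

theorem pv_reduce (m : ℕ) (hm : 32 ≤ m) :
    pvStep^[m] (1, 1) = pvStep^[32 + (m - 32) % 24] (1, 1) := by
  have h1 : pvStep^[m] (1, 1) = pvStep^[m - 32] (pvStep^[32] (1, 1)) := by
    rw [← Function.iterate_add_apply]; congr 1; omega
  rw [h1, pv_tail (m - 32),
      show 32 + (m - 32) % 24 = (m - 32) % 24 + 32 from by omega,
      Function.iterate_add_apply]

-- ===== VERDICT (by name: the statement is the Claim_ definition above) =====
theorem spcl_fibo_spec : Claim_equal_spcl_fibo := by
  unfold Claim_equal_spcl_fibo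
  intro n _ hpre
  unfold Spec_spcl_fibo Pre_spcl_fibo at *
  by_cases h01 : (n == 0 || n == 1) = true
  · unfold spcl_fibo spcl_fibo_alt
    rw [if_pos h01, if_pos h01]
  · have h2 : 2 ≤ n := by
      simp only [beq_iff_eq, Bool.or_eq_true] at h01
      omega
    rw [pv_A_iterate n h2]
    unfold spcl_fibo_alt
    rw [if_neg h01]
    simp only
    by_cases hbig : n - 1 > 32
    · rw [if_pos hbig]
      rw [PySem.Int.mod_eq_emod_of_pos (by omega : (0:Int) < 24)]
      obtain ⟨t, ht⟩ : ∃ t : ℕ, n - 1 - 32 = (t : Int) := ⟨(n - 1 - 32).toNat, by omega⟩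
      have hemod : (n - 1 - 32) % 24 = ((t % 24 : ℕ) : Int) := by
        rw [ht]; exact_mod_cast rfl
      have htn : (32 + (n - 1 - 32) % 24).toNat = 32 + t % 24 := by
        rw [hemod]; omega
      rw [htn, pv_reduce (n - 1).toNat (by omega)]
      congr 2
      omega
    · rw [if_neg hbig]
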